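-- pv_equiv track=rewrite | github.com/jianershi/algorithm | lintcode/array_slice.1.py | solution
-- ===== SOURCE A (Python) =====
-- def solution(A):
--     # write your code in Python 3.6
--     if not A:
--         return 0
--
--     n = len(A)
--     if n == 1:
--         return 1
--
--     count = 2
--     res = 2
--     for i in range(2, n):
--         if A[i] == A[i - 2]:
--             count += 1
--             res = max(res,count)
--         else:
--             res = max(res,count)
--             count = 2
--     return max(res, count)
-- ===== SOURCE B (Python) =====
-- def solution(A):
--     n = len(A)
--     if n == 0:
--         return 0
--     if n == 1:
--         return 1
--     # breakpoint positions: indices where the i/(i-2) chain is broken,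
--     # with sentinels 1 (before the first real index) and n (one past the end);
--     # the answer is the widest gap between consecutive breakpoints, inclusive.
--     pts = [1] + [i for i in range(2, n) if A[i] != A[i - 2]] + [n]
--     return max(q - p + 1 for p, q in zip(pts, pts[1:]))
-- ===== Notes on version B (the rewrite author's own statement) =====
-- stated objective: alternative
-- what changed: Instead of A's fused run-length counter with reset and running max, B collects the breakpoint positions (indices i with A[i] != A[i-2]) between sentinels 1 and n, and returns the widest inclusive gap between consecutive breakpoints; no run counter is maintained at all.
import Mathlib
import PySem

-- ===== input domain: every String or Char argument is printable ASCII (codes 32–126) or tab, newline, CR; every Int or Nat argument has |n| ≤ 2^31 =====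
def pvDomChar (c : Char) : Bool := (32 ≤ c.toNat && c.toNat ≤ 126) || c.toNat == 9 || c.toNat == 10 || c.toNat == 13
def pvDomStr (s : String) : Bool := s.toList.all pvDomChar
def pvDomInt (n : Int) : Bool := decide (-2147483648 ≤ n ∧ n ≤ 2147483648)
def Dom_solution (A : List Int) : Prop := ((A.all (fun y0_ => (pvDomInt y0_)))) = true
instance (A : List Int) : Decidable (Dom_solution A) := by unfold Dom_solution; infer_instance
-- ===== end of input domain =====

-- B replaces A's fused run-counter-with-reset scan by a breakpoint decomposition:
-- collect the indices where A[i] != A[i-2] between sentinels 1 and n, and return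
-- the widest inclusive gap between consecutive breakpoints (alternative, same cost).

-- ===== PORT A =====
def solution (A : List Int) : Int :=
  if A = [] then 0
  else
    if (A.length : Int) = 1 then 1
    else
      let st := (PySem.List.pyRange 2 (A.length : Int) 1).foldl
        (fun (s : Int × Int) i =>
          if PySem.List.pyGetD A i 0 = PySem.List.pyGetD A (i - 2) 0 then
            (s.1 + 1, max s.2 (s.1 + 1))
          else
            (2, max s.2 s.1)) (2, 2)
      max st.2 st.1

-- ===== PORT B =====
def solution_alt (A : List Int) : Int :=
  if (A.length : Int) = 0 then 0
  else if (A.length : Int) = 1 then 1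
  else
    let pts : List Int :=
      1 :: ((PySem.List.pyRange 2 (A.length : Int) 1).filter
        (fun i => !(PySem.List.pyGetD A i 0 == PySem.List.pyGetD A (i - 2) 0))) ++
        [(A.length : Int)]
    let gaps : List Int := (pts.zip pts.tail).map (fun pq => pq.2 - pq.1 + 1)
    -- Python's max over a nonempty generator; pts always has ≥ 2 points, so gaps ≠ []
    match PySem.List.max? gaps (fun v => v) with
    | some v => v
    | none => 0

-- ===== PRECONDITION & SPEC =====
def Spec_solution (A : List Int) (out : Int) : Prop := out = solution_alt A
instance (A : List Int) (out : Int) : Decidable (Spec_solution A out) := by unfold Spec_solution; infer_instance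

-- ===== CLAIM (what is proved, stated in full; the proofs are below) =====
def Claim_equal_solution : Prop := ∀ (A : List Int), Dom_solution A → Spec_solution A (solution A)

-- ===== LEMMAS AND PROOFS =====

/-- Max gap helper: `pvMG x ys` is the widest inclusive gap between consecutive
    points of the chain `x :: ys`. -/
def pvMG : Int → List Int → Int
  | _, [] => 0
  | x, [y] => y - x + 1
  | x, y :: z :: zs => max (y - x + 1) (pvMG y (z :: zs))

lemma head_le_pvMG (x y : Int) (ys : List Int) : y - x + 1 ≤ pvMG x (y :: ys) := by
  cases ys <;> simp [pvMG]

lemma pvMG_cons_cons (x y z : Int) (zs : List Int) :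
    pvMG x (y :: z :: zs) = max (y - x + 1) (pvMG y (z :: zs)) := by
  simp [pvMG]

lemma foldl_max_pull (l : List Int) : ∀ a b : Int, l.foldl max (max a b) = max a (l.foldl max b) := by
  induction l with
  | nil => intro a b; simp
  | cons h t iht =>
    intro a b
    simp only [List.foldl_cons]
    rw [max_assoc]
    exact iht a (max b h)

/-- B's zip/map/max pipeline computes `pvMG`. -/
lemma maxGaps_eq_pvMG (ys : List Int) : ∀ (x : Int), ys ≠ [] →
    PySem.List.max? (((x :: ys).zip (x :: ys).tail).map (fun pq => pq.2 - pq.1 + 1))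
      (fun v => v) = some (pvMG x ys) := by
  induction ys with
  | nil => intro x h; exact absurd rfl h
  | cons y ys ih =>
    intro x _
    cases ys with
    | nil => simp [pvMG, PySem.List.max?]
    | cons z zs =>
      have hIH := ih y (by simp)
      simp only [List.tail_cons, List.zip_cons_cons, List.map_cons] at hIH ⊢
      rw [PySem.List.max?_id_cons] at hIH ⊢
      simp only [List.foldl_cons] at hIH ⊢
      rw [foldl_max_pull]
      simp only [Option.some.injEq] at hIH
      rw [hIH, pvMG_cons_cons]

/-- elements of `filter p (pyRange a b 1) ++ [b]` are all ≥ a (when a ≤ b). -/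
lemma head_ge (p : Int → Bool) (a b : Int) (hab : a ≤ b) :
    ∀ y ∈ ((PySem.List.pyRange a b 1).filter p ++ [b]), a ≤ y := by
  intro y hy
  rcases List.mem_append.mp hy with h | h
  · have := List.mem_of_mem_filter h
    exact (PySem.List.mem_pyRange_one.mp this).1
  · simp at h; omega

/-- Main invariant: A's fused scan over consecutive indices `[a, b)` starting from
    state `(count, best)` (with the breakpoint convention `last = a - count + 1`)
    computes `max best (pvMG (a - count + 1) (breakpoints ++ [b]))`. -/
lemma scan_eq_MG (p : Int → Bool) (b : Int) :
    ∀ (k : ℕ) (a count best : Int), (b - a).toNat ≤ k → 2 ≤ count → count ≤ best →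
    (let st := (PySem.List.pyRange a b 1).foldl
        (fun (s : Int × Int) i =>
          if p i then (s.1 + 1, max s.2 (s.1 + 1)) else (2, max s.2 s.1)) (count, best)
     max st.2 st.1)
    = max best (pvMG (a - count + 1)
        (((PySem.List.pyRange a b 1).filter (fun i => !(p i))) ++ [b])) := by
  intro k
  induction k with
  | zero =>
    intro a count best hk h2 hcb
    have hba : b ≤ a := by omega
    rw [PySem.List.pyRange_one_eq_nil hba]
    simp only [List.foldl_nil, List.filter_nil, List.nil_append, pvMG]
    omega
  | succ k ih =>
    intro a count best hk h2 hcb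
    by_cases hab : a < b
    · rw [PySem.List.pyRange_one_cons hab]
      simp only [List.foldl_cons, List.filter_cons]
      by_cases hp : p a
      · simp only [hp, if_pos, Bool.not_true, Bool.false_eq_true, if_neg, not_false_iff]
        have := ih (a + 1) (count + 1) (max best (count + 1)) (by omega) (by omega) (by omega)
        simp only at this
        rw [this]
        have he : a + 1 - (count + 1) + 1 = a - count + 1 := by ring
        rw [he]
        -- absorb (count+1) into the MG term: the first point is ≥ a + 1
        rcases hl : (PySem.List.pyRange (a+1) b 1).filter (fun i => !(p i)) ++ [b] with _ | ⟨y, ys⟩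
        · exact absurd hl (by simp)
        · have hy : a + 1 ≤ y :=
            head_ge (fun i => !(p i)) (a+1) b (by omega) y (by rw [hl]; simp)
          have hhead := head_le_pvMG (a - count + 1) y ys
          omega
      · simp only [hp, if_neg, Bool.false_eq_true, not_false_iff, Bool.not_false, if_pos]
        have := ih (a + 1) 2 (max best count) (by omega) (by omega) (by omega)
        simp only at this
        rw [this]
        have he : a + 1 - 2 + 1 = a := by ring
        rw [he, List.cons_append]
        rcases hl : (PySem.List.pyRange (a+1) b 1).filter (fun i => !(p i)) ++ [b] with _ | ⟨z, zs⟩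
        · exact absurd hl (by simp)
        · rw [pvMG_cons_cons]
          have hg : a - (a - count + 1) + 1 = count := by ring
          rw [hg]
          omega
    · have hba : b ≤ a := by omega
      rw [PySem.List.pyRange_one_eq_nil hba]
      simp only [List.foldl_nil, List.filter_nil, List.nil_append, pvMG]
      omega

-- ===== VERDICT (by name: the statement is the Claim_ definition above) =====
theorem solution_spec : Claim_equal_solution := by
  intro A _
  show solution A = solution_alt A
  by_cases hA : A = []
  · subst hA; simp [solution, solution_alt]
  · have h0 : (A.length : Int) ≠ 0 := by
      simpa [Int.natCast_eq_zero, List.length_eq_zero_iff] using hA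
    by_cases h1 : (A.length : Int) = 1
    · simp [solution, solution_alt, hA, h1]
    · simp only [solution, solution_alt, if_neg hA, if_neg h0, if_neg h1]
      set n : Int := (A.length : Int) with hn
      have hn2 : (2 : Int) ≤ n := by omega
      have hfun : (fun (s : Int × Int) i =>
            if PySem.List.pyGetD A i 0 = PySem.List.pyGetD A (i - 2) 0 then
              (s.1 + 1, max s.2 (s.1 + 1)) else (2, max s.2 s.1))
          = (fun (s : Int × Int) i =>
            if (PySem.List.pyGetD A i 0 == PySem.List.pyGetD A (i - 2) 0) = true then
              (s.1 + 1, max s.2 (s.1 + 1)) else (2, max s.2 s.1)) := by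
        funext s i
        by_cases h : PySem.List.pyGetD A i 0 = PySem.List.pyGetD A (i - 2) 0 <;> simp [h]
      rw [hfun]
      have hmain := scan_eq_MG
        (fun i => PySem.List.pyGetD A i 0 == PySem.List.pyGetD A (i - 2) 0)
        n (n - 2).toNat 2 2 2 (by omega) (by omega) (by omega)
      simp only at hmain
      rw [hmain, List.cons_append]
      rw [maxGaps_eq_pvMG
        ((PySem.List.pyRange 2 n 1).filter
          (fun i => !(PySem.List.pyGetD A i 0 == PySem.List.pyGetD A (i - 2) 0)) ++ [n])
        1 (by simp)]
      have hnorm : (2 : Int) - 2 + 1 = 1 := by ring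
      rw [hnorm]
      -- max 2 (pvMG 1 pts) = pvMG 1 pts since the first point is ≥ 2
      rcases hl : (PySem.List.pyRange 2 n 1).filter
          (fun i => !(PySem.List.pyGetD A i 0 == PySem.List.pyGetD A (i - 2) 0)) ++ [n]
        with _ | ⟨y, ys⟩
      · exact absurd hl (by simp)
      · show max 2 (pvMG 1 (y :: ys)) = pvMG 1 (y :: ys)
        have hy : (2 : Int) ≤ y :=
          head_ge (fun i => !(PySem.List.pyGetD A i 0 == PySem.List.pyGetD A (i - 2) 0))
            2 n (by omega) y (by rw [hl]; simp)
        have hhead := head_le_pvMG 1 y ys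
        omega
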